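-- pv_equiv track=rewrite | github.com/HaoNgo232/Synapse-Desktop | core/prompting/delimiter_utils.py | calculate_markdown_delimiter
-- ===== SOURCE A (Python) =====
-- def calculate_markdown_delimiter(contents: list[str]) -> str:
--     """
--     Tinh toan delimiter an toan cho markdown code blocks.
--
--     Khi file content chua backticks (```), can dung nhieu backticks hon
--     cho code block wrapper de tranh broken markdown.
--
--     Port tu Repomix (src/core/output/outputGenerate.ts lines 26-31)
--
--     Args:
--         contents: Danh sach noi dung files
--
--     Returns:
--         Delimiter string (toi thieu 3 backticks, hoac nhieu hon neu can)
--     """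
--     max_backticks = 0
--
--     for content in contents:
--         # Character scan O(n) instead of regex overhead
--         current_count = 0
--         for char in content:
--             if char == "`":
--                 current_count += 1
--             else:
--                 if current_count > max_backticks:
--                     max_backticks = current_count
--                 current_count = 0
--         # Check final sequence
--         if current_count > max_backticks:
--             max_backticks = current_count
--
--     # Delimiter phai lon hon max backticks tim thay, toi thieu 3
--     return "`" * max(3, max_backticks + 1)
-- ===== SOURCE B (Python) =====
-- def calculate_markdown_delimiter(contents: list[str]) -> str:
--     # Probe increasing delimiter sizes by substring search instead of scanning runs:
--     # the answer is the smallest n >= 3 such that no content contains n consecutive backticks.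
--     n = 3
--     while any("`" * n in content for content in contents):
--         n += 1
--     return "`" * n
-- ===== Notes on version B (the rewrite author's own statement) =====
-- stated objective: alternative
-- what changed: B replaces A's per-character run-counting scan with a search loop: it probes increasing candidate sizes n starting at 3 and returns the first n such that '`'*n is not a substring of any content.
import Mathlib
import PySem

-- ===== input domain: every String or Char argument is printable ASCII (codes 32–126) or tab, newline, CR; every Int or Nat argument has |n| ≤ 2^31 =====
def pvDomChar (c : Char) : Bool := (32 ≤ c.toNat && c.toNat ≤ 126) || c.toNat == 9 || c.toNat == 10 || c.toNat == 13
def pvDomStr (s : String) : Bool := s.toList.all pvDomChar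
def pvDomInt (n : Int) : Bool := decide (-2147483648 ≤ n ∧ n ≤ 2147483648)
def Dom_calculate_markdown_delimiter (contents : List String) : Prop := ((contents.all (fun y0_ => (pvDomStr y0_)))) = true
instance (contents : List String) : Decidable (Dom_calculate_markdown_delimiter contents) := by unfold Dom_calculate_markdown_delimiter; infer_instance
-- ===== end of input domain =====

-- B replaces A's per-character run-counting scan with a probe loop returning the
-- smallest n ≥ 3 such that n consecutive backticks occur in no content (alternative algorithm).


-- ===== PORT A =====
-- one step of A's inner character loop; state = (max_backticks, current_count)
def pvStepA (p : Nat × Nat) (ch : Char) : Nat × Nat :=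
  if ch = '`' then (p.1, p.2 + 1)
  else if p.2 > p.1 then (p.2, 0) else (p.1, 0)

-- A's body of the outer loop: scan one content, then the final-sequence check
def pvContentA (mb : Nat) (content : String) : Nat :=
  let p := content.toList.foldl pvStepA (mb, 0)
  if p.2 > p.1 then p.2 else p.1

def calculate_markdown_delimiter (contents : List String) : String :=
  let max_backticks := contents.foldl pvContentA 0
  String.ofList (List.replicate (max 3 (max_backticks + 1)) '`')

-- ===== PORT B =====
-- generic fact about a running maximum, used for the while loop's termination below
theorem pvFoldlMaxLeIff (f : String → Nat) (l : List String) : ∀ (init n : Nat),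
    (n ≤ l.foldl (fun m c => max m (f c)) init ↔ n ≤ init ∨ ∃ c ∈ l, n ≤ f c) := by
  induction l with
  | nil => intro init n; simp
  | cons x t ih =>
    intro init n
    simp only [List.foldl_cons, List.mem_cons]
    rw [ih]
    constructor
    · rintro (h | ⟨c, hc, hfc⟩)
      · by_cases h2 : n ≤ init
        · exact Or.inl h2
        · exact Or.inr ⟨x, Or.inl rfl, by omega⟩
      · exact Or.inr ⟨c, Or.inr hc, hfc⟩
    · rintro (h | ⟨c, hc, hfc⟩)
      · exact Or.inl (le_trans h (Nat.le_max_left _ _))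
      · rcases hc with rfl | hc
        · exact Or.inl (le_trans hfc (Nat.le_max_right _ _))
        · exact Or.inr ⟨c, hc, hfc⟩

-- bound used only for termination of the while loop
def pvMaxLen (contents : List String) : Nat :=
  contents.foldl (fun m c => max m c.toList.length) 0

theorem pvMaxLen_bound (contents : List String) :
    ∀ c ∈ contents, c.toList.length ≤ pvMaxLen contents := by
  intro c hc
  exact (pvFoldlMaxLeIff (fun c => c.toList.length) contents 0 _).mpr (Or.inr ⟨c, hc, le_rfl⟩)

-- the while loop of Source B: n += 1 while some content contains "`" * n
def pvAltLoop (contents : List String) (n : Nat) : Nat :=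
  if h : contents.any (fun content => PySem.Str.isIn (String.ofList (List.replicate n '`')) content) then
    pvAltLoop contents (n + 1)
  else n
termination_by (pvMaxLen contents + 1) - n
decreasing_by
  simp only [List.any_eq_true] at h
  obtain ⟨c, hc, hin⟩ := h
  have hinf := (PySem.Str.isIn_iff_infix _ _).mp hin
  simp only [String.toList_ofList] at hinf
  have hlen : n ≤ c.toList.length := by simpa using hinf.length_le
  have := pvMaxLen_bound contents c hc
  omega

def calculate_markdown_delimiter_alt (contents : List String) : String :=
  String.ofList (List.replicate (pvAltLoop contents 3) '`')

-- ===== PRECONDITION & SPEC =====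
def Spec_calculate_markdown_delimiter (contents : List String) (out : String) : Prop := out = calculate_markdown_delimiter_alt contents
instance (contents : List String) (out : String) : Decidable (Spec_calculate_markdown_delimiter contents out) := by unfold Spec_calculate_markdown_delimiter; infer_instance

-- ===== CLAIM (what is proved, stated in full; the proofs are below) =====
def Claim_equal_calculate_markdown_delimiter : Prop := ∀ (contents : List String), Dom_calculate_markdown_delimiter contents → Spec_calculate_markdown_delimiter contents (calculate_markdown_delimiter contents)

-- ===== LEMMAS AND PROOFS =====

-- pvG s c = final max_backticks of A's inner loop started with max 0, count c (max folded at the end)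
def pvG : List Char → Nat → Nat
  | [], c => c
  | ch :: t, c => if ch = '`' then pvG t (c + 1) else max c (pvG t 0)

-- length of the leading backtick run
def pvLead : List Char → Nat
  | [] => 0
  | ch :: t => if ch = '`' then pvLead t + 1 else 0

theorem pvG_eq (s : List Char) : ∀ c, pvG s c = max (c + pvLead s) (pvG s 0) := by
  induction s with
  | nil => intro c; simp [pvG, pvLead]
  | cons ch t ih =>
    intro c
    simp only [pvG, pvLead]
    split_ifs with h
    · rw [ih (c + 1), ih (0 + 1)]; omega
    · omega

-- A's inner fold (including the final-sequence check) computes max m (pvG s c)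
theorem pvFoldA_eq (s : List Char) : ∀ m c,
    (let p := s.foldl pvStepA (m, c); if p.2 > p.1 then p.2 else p.1) = max m (pvG s c) := by
  induction s with
  | nil =>
    intro m c
    simp only [List.foldl_nil, pvG]
    split_ifs <;> omega
  | cons ch t ih =>
    intro m c
    by_cases h : ch = '`'
    · rw [show (ch :: t).foldl pvStepA (m, c) = t.foldl pvStepA (m, c + 1) from by
        simp [pvStepA, h]]
      rw [show pvG (ch :: t) c = pvG t (c + 1) from by simp [pvG, h]]
      exact ih m (c + 1)
    · rw [show pvG (ch :: t) c = max c (pvG t 0) from by simp [pvG, h]]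
      by_cases hc : c > m
      · rw [show (ch :: t).foldl pvStepA (m, c) = t.foldl pvStepA (c, 0) from by
          simp [pvStepA, h, hc]]
        rw [ih c 0]; omega
      · rw [show (ch :: t).foldl pvStepA (m, c) = t.foldl pvStepA (m, 0) from by
          simp [pvStepA, h, hc]]
        rw [ih m 0]; omega

theorem pvContentA_eq (mb : Nat) (content : String) :
    pvContentA mb content = max mb (pvG content.toList 0) := by
  simpa [pvContentA] using pvFoldA_eq content.toList mb 0

-- A's outer fold is a running maximum of pvG
theorem pvFoldAList (l : List String) : ∀ init,
    l.foldl pvContentA init = l.foldl (fun m c => max m (pvG c.toList 0)) init := by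
  induction l with
  | nil => intro init; rfl
  | cons x t ih =>
    intro init
    simp only [List.foldl_cons, pvContentA_eq]
    exact ih _

-- the maximal backtick run over all contents, as A computes it
def pvM (contents : List String) : Nat := contents.foldl pvContentA 0

-- replicate n '`' is a prefix of s iff n ≤ leading run
theorem pvReplicatePrefixIff (n : Nat) (s : List Char) :
    List.replicate n '`' <+: s ↔ n ≤ pvLead s := by
  induction n generalizing s with
  | zero => simp
  | succ m ih =>
    cases s with
    | nil => simp [pvLead, List.replicate_succ]
    | cons ch t =>
      rw [List.replicate_succ]
      constructor
      · intro h
        rcases List.cons_prefix_cons.mp h with ⟨h1, h2⟩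
        simp [pvLead, ← h1, (ih t).mp h2]
      · intro h
        simp only [pvLead] at h
        split_ifs at h with hch
        · subst hch
          exact List.cons_prefix_cons.mpr ⟨rfl, (ih t).mpr (by omega)⟩
        · omega

-- replicate n '`' is a substring of s iff some backtick run of s has length ≥ n (n ≥ 1)
theorem pvReplicateInfixIff (n : Nat) (hn : 1 ≤ n) (s : List Char) :
    List.replicate n '`' <:+: s ↔ n ≤ pvG s 0 := by
  induction s with
  | nil =>
    simp only [List.infix_nil, List.replicate_eq_nil_iff, pvG]
    omega
  | cons ch t ih =>
    rw [List.infix_cons_iff, ih, pvReplicatePrefixIff]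
    by_cases h : ch = '`'
    · subst h
      have e1 : pvG ('`' :: t) 0 = pvG t 1 := by simp [pvG]
      have e2 : pvLead ('`' :: t) = pvLead t + 1 := by simp [pvLead]
      rw [e1, e2, pvG_eq t 1]
      omega
    · have e1 : pvG (ch :: t) 0 = max 0 (pvG t 0) := by simp [pvG, h]
      have e2 : pvLead (ch :: t) = 0 := by simp [pvLead, h]
      rw [e1, e2]
      omega

-- the while-loop condition holds iff n does not yet exceed the maximal run
theorem pvCondIff (contents : List String) (n : Nat) (hn : 1 ≤ n) :
    (contents.any (fun content => PySem.Str.isIn (String.ofList (List.replicate n '`')) content) = true)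
      ↔ n ≤ pvM contents := by
  have hM : ∀ m, m ≤ pvM contents ↔ m ≤ 0 ∨ ∃ c ∈ contents, m ≤ pvG c.toList 0 := by
    intro m
    rw [pvM, pvFoldAList, pvFoldlMaxLeIff]
  rw [List.any_eq_true]
  constructor
  · rintro ⟨c, hc, hin⟩
    have hinf := (PySem.Str.isIn_iff_infix _ _).mp hin
    simp only [String.toList_ofList] at hinf
    exact (hM n).mpr (Or.inr ⟨c, hc, (pvReplicateInfixIff n hn _).mp hinf⟩)
  · intro h
    rcases (hM n).mp h with h0 | ⟨c, hc, hg⟩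
    · omega
    · refine ⟨c, hc, (PySem.Str.isIn_iff_infix _ _).mpr ?_⟩
      simpa [String.toList_ofList] using (pvReplicateInfixIff n hn _).mpr hg

theorem pvAltLoop_eq (contents : List String) :
    ∀ k n, 1 ≤ n → pvM contents + 1 ≤ n + k → pvAltLoop contents n = max n (pvM contents + 1) := by
  intro k
  induction k with
  | zero =>
    intro n hn hk
    rw [pvAltLoop, dif_neg]
    · omega
    · rw [pvCondIff contents n hn]; omega
  | succ k ih =>
    intro n hn hk
    by_cases hcase : n ≤ pvM contents
    · rw [pvAltLoop, dif_pos ((pvCondIff contents n hn).mpr hcase),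
        ih (n + 1) (by omega) (by omega)]
      omega
    · rw [pvAltLoop, dif_neg]
      · omega
      · rw [pvCondIff contents n hn]; omega

-- ===== VERDICT (by name: the statement is the Claim_ definition above) =====
theorem calculate_markdown_delimiter_spec : Claim_equal_calculate_markdown_delimiter := by
  intro contents _
  unfold Spec_calculate_markdown_delimiter calculate_markdown_delimiter calculate_markdown_delimiter_alt
  rw [pvAltLoop_eq contents (pvM contents) 3 (by omega) (by omega)]
  rfl
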